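-- pv_equiv track=rewrite | github.com/AnishVIP03/duriandetector | backend/apps/attack_chains/correlation.py | _classify_chain
-- ===== SOURCE A (Python) =====
-- CHAIN_PATTERNS = {
--     'recon_to_exploit': {
--         'required': {'port_scan'},
--         'plus_any': {'sql_injection', 'xss', 'brute_force', 'protocol_anomaly'},
--     },
--     'scan_to_brute': {
--         'required': {'port_scan', 'brute_force'},
--         'plus_any': set(),
--     },
--     'dos_campaign': {
--         'required': {'dos'},
--         'plus_any': set(),
--         'min_count': 3,  # Need at least 3 DoS alerts to call it a campaign
--     },
-- }
--
-- def _classify_chain(alert_types, alert_count):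
--     """Determine chain type based on the set of alert types observed."""
--     for chain_type, pattern in CHAIN_PATTERNS.items():
--         required = pattern['required']
--         plus_any = pattern.get('plus_any', set())
--         min_count = pattern.get('min_count', 2)
--
--         if required.issubset(alert_types):
--             if not plus_any or plus_any.intersection(alert_types):
--                 if alert_count >= min_count:
--                     return chain_type
--
--     # If multiple distinct attack types but no specific pattern matched
--     if len(alert_types) >= 2:
--         return 'multi_stage'
--
--     return 'other'
-- ===== SOURCE B (Python) =====
-- def _classify_chain(alert_types, alert_count):
--     """Determine chain type based on the set of alert types observed."""
--     if 'port_scan' in alert_types and alert_count >= 2: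
--         if any(t in alert_types for t in ('sql_injection', 'xss', 'brute_force', 'protocol_anomaly')):
--             return 'recon_to_exploit'
--         if 'brute_force' in alert_types:
--             return 'scan_to_brute'
--     if 'dos' in alert_types and alert_count >= 3:
--         return 'dos_campaign'
--     return 'multi_stage' if len(alert_types) >= 2 else 'other'
-- ===== Notes on version B (the rewrite author's own statement) =====
-- stated objective: simpler
-- what changed: Replaced the generic pattern-table loop (subset/intersection tests over CHAIN_PATTERNS) with inlined explicit conditional branches in the table's insertion order.
import Mathlib
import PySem

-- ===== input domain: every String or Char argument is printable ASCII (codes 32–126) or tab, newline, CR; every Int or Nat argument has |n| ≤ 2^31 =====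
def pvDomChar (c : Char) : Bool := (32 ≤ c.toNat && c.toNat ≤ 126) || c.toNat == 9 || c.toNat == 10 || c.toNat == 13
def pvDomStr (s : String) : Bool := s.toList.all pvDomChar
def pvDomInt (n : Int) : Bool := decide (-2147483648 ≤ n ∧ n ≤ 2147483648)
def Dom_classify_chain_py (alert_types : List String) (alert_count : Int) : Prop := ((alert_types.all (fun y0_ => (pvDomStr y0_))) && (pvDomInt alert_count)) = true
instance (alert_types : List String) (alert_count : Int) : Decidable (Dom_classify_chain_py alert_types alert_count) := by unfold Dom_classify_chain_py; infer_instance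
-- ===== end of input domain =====

-- B inlines the CHAIN_PATTERNS table into explicit conditional branches (same order), for simplicity; return values are equal.
-- ===== PORT A =====
-- CHAIN_PATTERNS: insertion-ordered list of (chain_type, required, plus_any, min_count);
-- min_count carries the .get default 2 for the first two entries.
def chainPatterns : List (String × List String × List String × Int) :=
  [("recon_to_exploit", ["port_scan"], ["sql_injection", "xss", "brute_force", "protocol_anomaly"], 2),
   ("scan_to_brute", ["port_scan", "brute_force"], [], 2),
   ("dos_campaign", ["dos"], [], 3)]

-- the for-loop over CHAIN_PATTERNS.items(); `some` = early return
def classifyLoop (ps : List (String × List String × List String × Int)) (alert_types : List String) (alert_count : Int) : Option String :=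
  match ps with
  | [] => none
  | (chain_type, required, plus_any, min_count) :: rest =>
    if required.all (fun t => alert_types.contains t) then
      if plus_any.isEmpty || plus_any.any (fun t => alert_types.contains t) then
        if min_count ≤ alert_count then chain_type
        else classifyLoop rest alert_types alert_count
      else classifyLoop rest alert_types alert_count
    else classifyLoop rest alert_types alert_count

def classify_chain_py (alert_types : List String) (alert_count : Int) : String :=
  match classifyLoop chainPatterns alert_types alert_count with
  | some s => s
  | none => if alert_types.length ≥ 2 then "multi_stage" else "other"

-- ===== PORT B =====
def classify_chain_py_alt (alert_types : List String) (alert_count : Int) : String :=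
  if alert_types.contains "port_scan" && 2 ≤ alert_count then
    if ["sql_injection", "xss", "brute_force", "protocol_anomaly"].any (fun t => alert_types.contains t) then
      "recon_to_exploit"
    else if alert_types.contains "brute_force" then "scan_to_brute"
    else if alert_types.contains "dos" && 3 ≤ alert_count then "dos_campaign"
    else if alert_types.length ≥ 2 then "multi_stage" else "other"
  else if alert_types.contains "dos" && 3 ≤ alert_count then "dos_campaign"
  else if alert_types.length ≥ 2 then "multi_stage" else "other"

-- ===== PRECONDITION & SPEC =====
def Spec_classify_chain_py (alert_types : List String) (alert_count : Int) (out : String) : Prop := out = classify_chain_py_alt alert_types alert_count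
instance (alert_types : List String) (alert_count : Int) (out : String) : Decidable (Spec_classify_chain_py alert_types alert_count out) := by unfold Spec_classify_chain_py; infer_instance

-- ===== CLAIM (what is proved, stated in full; the proofs are below) =====
def Claim_equal_classify_chain_py : Prop := ∀ (alert_types : List String) (alert_count : Int), Dom_classify_chain_py alert_types alert_count → Spec_classify_chain_py alert_types alert_count (classify_chain_py alert_types alert_count)

-- ===== LEMMAS AND PROOFS =====

-- ===== VERDICT (by name: the statement is the Claim_ definition above) =====
set_option maxHeartbeats 2000000 in
theorem classify_chain_py_spec : Claim_equal_classify_chain_py := by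
  intro alert_types alert_count _
  unfold Spec_classify_chain_py classify_chain_py classify_chain_py_alt chainPatterns classifyLoop
  simp only [List.all_cons, List.all_nil, List.any_cons, List.any_nil, List.isEmpty_cons,
    Bool.and_true, Bool.or_false, Bool.false_or]
  by_cases hp : "port_scan" ∈ alert_types <;>
  by_cases hb : "brute_force" ∈ alert_types <;>
  by_cases hd : "dos" ∈ alert_types <;>
  by_cases hsq : "sql_injection" ∈ alert_types <;>
  by_cases hx : "xss" ∈ alert_types <;>
  by_cases hpa : "protocol_anomaly" ∈ alert_types <;>
  by_cases h2 : (2:Int) ≤ alert_count <;>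
  by_cases h3 : (3:Int) ≤ alert_count <;>
  simp [classifyLoop, hp, hb, hd, hsq, hx, hpa, h2, h3]
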